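-- pv_equiv track=rewrite | github.com/alejandrogonzalvo/qusim | gui/dse_engine.py | clamp_k_for_topology
-- ===== SOURCE A (Python) =====
-- def inter_core_neighbors(num_cores: int, inter_topology: str) -> list[list[int]]:
--     """Per-core list of unique neighbouring core indices."""
--     import math
--     if num_cores < 2:
--         return [[] for _ in range(num_cores)]
--     nbrs: list[list[int]] = [[] for _ in range(num_cores)]
--     inter = (inter_topology or "ring").lower()
--     if inter == "ring":
--         for c in range(num_cores):
--             nbrs[c].append((c + 1) % num_cores)
--             if num_cores > 2:
--                 nbrs[c].append((c - 1) % num_cores)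
--     elif inter == "linear":
--         for c in range(num_cores):
--             if c + 1 < num_cores:
--                 nbrs[c].append(c + 1)
--             if c - 1 >= 0:
--                 nbrs[c].append(c - 1)
--     elif inter == "all_to_all":
--         for c in range(num_cores):
--             for c2 in range(num_cores):
--                 if c2 != c:
--                     nbrs[c].append(c2)
--     elif inter == "grid":
--         side = math.ceil(math.sqrt(num_cores))
--         for c in range(num_cores):
--             row, col = divmod(c, side)
--             if col + 1 < side and c + 1 < num_cores:
--                 nbrs[c].append(c + 1)
--             if col > 0 and c - 1 >= 0:
--                 nbrs[c].append(c - 1)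
--             if c + side < num_cores:
--                 nbrs[c].append(c + side)
--             if c - side >= 0:
--                 nbrs[c].append(c - side)
--     else:
--         for c in range(num_cores):
--             nbrs[c].append((c + 1) % num_cores)
--             if num_cores > 2:
--                 nbrs[c].append((c - 1) % num_cores)
--     return [sorted(set(n)) for n in nbrs]
--
-- def core_groups_for(num_cores: int, inter_topology: str) -> list[list[int]]:
--     """Per-core *ordered* list of partner cores — one entry per inter-core link.
--
--     A core's ``g``-th group of comm qubits is dedicated to the ``g``-th
--     partner returned here.  Ordering is the sorted neighbour list (already
--     deterministic in :func:`inter_core_neighbors`).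
--     """
--     return inter_core_neighbors(num_cores, inter_topology)
--
-- def num_comm_groups(num_cores: int, inter_topology: str) -> list[int]:
--     """Number of comm-qubit groups per core (= number of inter-core neighbours)."""
--     return [len(g) for g in core_groups_for(num_cores, inter_topology)]
--
-- def _max_K_for_layout(core_size: int, num_groups: int, b_per_group: int = 1) -> int:
--     """Largest ``K`` (comm per group) that leaves at least one data qubit
--     given ``B`` buffer qubits per group.
--
--     Each group reserves ``K + B`` slots, so we need
--     ``core_size − G·(K+B) ≥ 1`` ⇒ ``K ≤ ⌊(core_size − 1)/G⌋ − B``.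
--     Returns 0 when no positive ``K`` is feasible.
--     """
--     if num_groups <= 0:
--         return 0
--     B = max(1, int(b_per_group or 1))
--     return max(0, (core_size - 1) // num_groups - B)
--
-- def clamp_k_for_topology(num_qubits: int, num_cores: int,
--                          topology_type: str, requested_k: int,
--                          b_per_group: int = 1) -> int:
--     """Clamp slider value ``K`` so every core keeps ≥ 1 data slot.
--
--     With ``B`` buffers per group, the cap shrinks: each group reserves
--     ``K+B`` slots, so ``K ≤ ⌊(qpc−1)/G⌋ − B``.
--     """
--     nq = max(1, int(num_qubits or 1))
--     nc = max(1, int(num_cores or 1))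
--     nc = min(nc, nq)
--     base = nq // nc
--     remainder = nq % nc
--     core_sizes = [base + (1 if c < remainder else 0) for c in range(nc)]
--     if nc < 2:
--         # No inter-core links, comm slots aren't physically meaningful.
--         return 1
--     groups = num_comm_groups(nc, topology_type or "ring")
--     B = max(1, int(b_per_group or 1))
--     K_caps = [
--         _max_K_for_layout(core_sizes[c], groups[c], b_per_group=B)
--         for c in range(nc) if groups[c] > 0
--     ]
--     K_max = min(K_caps) if K_caps else 0
--     return max(1, min(int(requested_k or 1), max(1, K_max)))
-- ===== SOURCE B (Python) =====
-- import math
--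
-- def clamp_k_for_topology(num_qubits: int, num_cores: int,
--                          topology_type: str, requested_k: int,
--                          b_per_group: int = 1) -> int:
--     """Single arithmetic pass: per-core neighbour COUNTS are computed by a
--     formula instead of building, deduplicating and sorting adjacency lists."""
--     nq = max(1, int(num_qubits or 1))
--     nc = min(max(1, int(num_cores or 1)), nq)
--     if nc < 2:
--         return 1
--     base, rem = divmod(nq, nc)
--     B = max(1, int(b_per_group or 1))
--     topo = (topology_type or "ring").lower()
--     if topo == "all_to_all":
--         deg = lambda c: nc - 1
--     elif topo == "linear":
--         deg = lambda c: (1 if c + 1 < nc else 0) + (1 if c > 0 else 0)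
--     elif topo == "grid":
--         side = math.ceil(math.sqrt(nc))
--         def deg(c):
--             col = c % side
--             return ((1 if col + 1 < side and c + 1 < nc else 0)
--                     + (1 if col > 0 else 0)
--                     + (1 if c + side < nc else 0)
--                     + (1 if c - side >= 0 else 0))
--     else:  # "ring" and any unrecognised topology behave like a ring
--         deg = lambda c: 1 if nc == 2 else 2
--     caps = [max(0, (base + (1 if c < rem else 0) - 1) // deg(c) - B)
--             for c in range(nc) if deg(c) > 0]
--     k_max = min(caps) if caps else 0
--     return max(1, min(int(requested_k or 1), max(1, k_max)))
-- ===== Notes on version B (the rewrite author's own statement) =====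
-- stated objective: faster
-- what changed: B computes each core's neighbour count with a closed-form degree formula per topology in one arithmetic pass, instead of materialising per-core adjacency lists, deduplicating them through set() and sorting them (and instead of the O(nc^2) all-to-all list construction).
import Mathlib
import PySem

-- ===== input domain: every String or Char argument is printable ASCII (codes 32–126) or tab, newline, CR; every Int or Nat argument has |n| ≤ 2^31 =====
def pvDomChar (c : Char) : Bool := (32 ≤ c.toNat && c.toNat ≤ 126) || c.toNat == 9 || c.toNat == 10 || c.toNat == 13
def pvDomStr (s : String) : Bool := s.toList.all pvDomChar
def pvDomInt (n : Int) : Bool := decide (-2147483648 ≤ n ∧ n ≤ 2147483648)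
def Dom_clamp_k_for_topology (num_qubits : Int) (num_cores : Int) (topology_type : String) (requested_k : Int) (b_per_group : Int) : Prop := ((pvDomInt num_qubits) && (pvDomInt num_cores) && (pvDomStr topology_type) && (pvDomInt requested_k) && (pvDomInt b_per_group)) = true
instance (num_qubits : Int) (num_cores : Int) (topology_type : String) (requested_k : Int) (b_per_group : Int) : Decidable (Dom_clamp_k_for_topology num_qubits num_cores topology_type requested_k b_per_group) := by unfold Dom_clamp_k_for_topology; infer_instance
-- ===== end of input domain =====

-- B replaces A's per-core adjacency-list construction (+ set() dedup + sort) by a closed-form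
-- per-core neighbour-count formula evaluated in one arithmetic pass (objective: faster).


-- ===== PORT A =====

-- math.ceil(math.sqrt(n)) — exact for 0 ≤ n ≤ 2^31 (double sqrt of such ints is correctly
-- rounded, so ceil gives the least s with s*s ≥ n); used by both ports (both Pythons call it).
def ceilSqrtInt (n : Int) : Int :=
  let r := Nat.sqrt n.toNat
  if r * r = n.toNat then (r : Int) else (r : Int) + 1

-- helper inter_core_neighbors of A, transliterated loop for loop (list mutation nbrs[c].append(x)
-- becomes pySetD nbrs c (pyGetD nbrs c [] ++ [x])).
def inter_core_neighbors (num_cores : Int) (inter_topology : String) : List (List Int) :=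
  if num_cores < 2 then (PySem.List.pyRange 0 num_cores 1).map (fun _ => ([] : List Int))
  else
    let nbrs0 : List (List Int) := (PySem.List.pyRange 0 num_cores 1).map (fun _ => ([] : List Int))
    let inter := PySem.Str.lower (if inter_topology = "" then "ring" else inter_topology)
    let nbrs :=
      if inter = "ring" then
        (PySem.List.pyRange 0 num_cores 1).foldl (fun a c =>
          let a := PySem.List.pySetD a c (PySem.List.pyGetD a c [] ++ [PySem.Int.mod (c + 1) num_cores])
          if num_cores > 2 then
            PySem.List.pySetD a c (PySem.List.pyGetD a c [] ++ [PySem.Int.mod (c - 1) num_cores])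
          else a) nbrs0
      else if inter = "linear" then
        (PySem.List.pyRange 0 num_cores 1).foldl (fun a c =>
          let a := if c + 1 < num_cores then
              PySem.List.pySetD a c (PySem.List.pyGetD a c [] ++ [c + 1]) else a
          if c - 1 ≥ 0 then
            PySem.List.pySetD a c (PySem.List.pyGetD a c [] ++ [c - 1]) else a) nbrs0
      else if inter = "all_to_all" then
        (PySem.List.pyRange 0 num_cores 1).foldl (fun a c =>
          (PySem.List.pyRange 0 num_cores 1).foldl (fun a2 c2 =>
            if c2 ≠ c then
              PySem.List.pySetD a2 c (PySem.List.pyGetD a2 c [] ++ [c2]) else a2) a) nbrs0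
      else if inter = "grid" then
        let side := ceilSqrtInt num_cores
        (PySem.List.pyRange 0 num_cores 1).foldl (fun a c =>
          let _row := PySem.Int.floordiv c side
          let col := PySem.Int.mod c side
          let a := if col + 1 < side ∧ c + 1 < num_cores then
              PySem.List.pySetD a c (PySem.List.pyGetD a c [] ++ [c + 1]) else a
          let a := if col > 0 ∧ c - 1 ≥ 0 then
              PySem.List.pySetD a c (PySem.List.pyGetD a c [] ++ [c - 1]) else a
          let a := if c + side < num_cores then
              PySem.List.pySetD a c (PySem.List.pyGetD a c [] ++ [c + side]) else a
          if c - side ≥ 0 then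
            PySem.List.pySetD a c (PySem.List.pyGetD a c [] ++ [c - side]) else a) nbrs0
      else
        (PySem.List.pyRange 0 num_cores 1).foldl (fun a c =>
          let a := PySem.List.pySetD a c (PySem.List.pyGetD a c [] ++ [PySem.Int.mod (c + 1) num_cores])
          if num_cores > 2 then
            PySem.List.pySetD a c (PySem.List.pyGetD a c [] ++ [PySem.Int.mod (c - 1) num_cores])
          else a) nbrs0
    nbrs.map (fun n => PySem.List.sorted (PySem.Set.ofList n) (fun x => x) false)

def core_groups_for (num_cores : Int) (inter_topology : String) : List (List Int) :=
  inter_core_neighbors num_cores inter_topology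

def num_comm_groups (num_cores : Int) (inter_topology : String) : List Int :=
  (core_groups_for num_cores inter_topology).map PySem.List.len

def _max_K_for_layout (core_size : Int) (num_groups : Int) (b_per_group : Int) : Int :=
  if num_groups ≤ 0 then 0
  else
    let B := max 1 (if b_per_group = 0 then 1 else b_per_group)
    max 0 (PySem.Int.floordiv (core_size - 1) num_groups - B)

def clamp_k_for_topology (num_qubits : Int) (num_cores : Int) (topology_type : String) (requested_k : Int) (b_per_group : Int) : Int :=
  let nq := max 1 (if num_qubits = 0 then 1 else num_qubits)
  let nc0 := max 1 (if num_cores = 0 then 1 else num_cores)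
  let nc := min nc0 nq
  let base := PySem.Int.floordiv nq nc
  let remainder := PySem.Int.mod nq nc
  let core_sizes := (PySem.List.pyRange 0 nc 1).map (fun c => base + (if c < remainder then 1 else 0))
  if nc < 2 then 1
  else
    let groups := num_comm_groups nc (if topology_type = "" then "ring" else topology_type)
    let B := max 1 (if b_per_group = 0 then 1 else b_per_group)
    let K_caps := ((PySem.List.pyRange 0 nc 1).filter
        (fun c => PySem.List.pyGetD groups c 0 > 0)).map
        (fun c => _max_K_for_layout (PySem.List.pyGetD core_sizes c 0) (PySem.List.pyGetD groups c 0) B)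
    let K_max := match PySem.List.min? K_caps (fun x => x) with
      | some m => m
      | none => 0
    max 1 (min (if requested_k = 0 then 1 else requested_k) (max 1 K_max))

-- ===== PORT B =====

def clamp_k_for_topology_alt (num_qubits : Int) (num_cores : Int) (topology_type : String) (requested_k : Int) (b_per_group : Int) : Int :=
  let nq := max 1 (if num_qubits = 0 then 1 else num_qubits)
  let nc := min (max 1 (if num_cores = 0 then 1 else num_cores)) nq
  if nc < 2 then 1
  else
    let base := PySem.Int.floordiv nq nc
    let rem := PySem.Int.mod nq nc
    let B := max 1 (if b_per_group = 0 then 1 else b_per_group)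
    let topo := PySem.Str.lower (if topology_type = "" then "ring" else topology_type)
    let deg : Int → Int :=
      if topo = "all_to_all" then fun _ => nc - 1
      else if topo = "linear" then
        fun c => (if c + 1 < nc then 1 else 0) + (if c > 0 then 1 else 0)
      else if topo = "grid" then
        let side := ceilSqrtInt nc
        fun c =>
          let col := PySem.Int.mod c side
          (if col + 1 < side ∧ c + 1 < nc then 1 else 0) + (if col > 0 then 1 else 0)
            + (if c + side < nc then 1 else 0) + (if c - side ≥ 0 then 1 else 0)
      else fun _ => if nc = 2 then 1 else 2
    let caps := ((PySem.List.pyRange 0 nc 1).filter (fun c => deg c > 0)).map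
        (fun c => max 0 (PySem.Int.floordiv (base + (if c < rem then 1 else 0) - 1) (deg c) - B))
    let k_max := match PySem.List.min? caps (fun x => x) with
      | some m => m
      | none => 0
    max 1 (min (if requested_k = 0 then 1 else requested_k) (max 1 k_max))

-- ===== PRECONDITION & SPEC =====
def Spec_clamp_k_for_topology (num_qubits : Int) (num_cores : Int) (topology_type : String) (requested_k : Int) (b_per_group : Int) (out : Int) : Prop := out = clamp_k_for_topology_alt num_qubits num_cores topology_type requested_k b_per_group
instance (num_qubits : Int) (num_cores : Int) (topology_type : String) (requested_k : Int) (b_per_group : Int) (out : Int) : Decidable (Spec_clamp_k_for_topology num_qubits num_cores topology_type requested_k b_per_group out) := by unfold Spec_clamp_k_for_topology; infer_instance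

-- ===== CLAIM (what is proved, stated in full; the proofs are below) =====
def Claim_equal_clamp_k_for_topology : Prop := ∀ (num_qubits : Int) (num_cores : Int) (topology_type : String) (requested_k : Int) (b_per_group : Int), Dom_clamp_k_for_topology num_qubits num_cores topology_type requested_k b_per_group → Spec_clamp_k_for_topology num_qubits num_cores topology_type requested_k b_per_group (clamp_k_for_topology num_qubits num_cores topology_type requested_k b_per_group)

-- ===== LEMMAS AND PROOFS =====

-- generic tabulation: a fold over range(n) whose c-th step only (re)writes slot c of a list of
-- empty slots produces the list [g 0, …, g (n-1)]
lemma tabulate_fold_aux (n : Nat) (step : List (List Int) → Int → List (List Int)) (g : Nat → List Int)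
    (hstep : ∀ (a : List (List Int)) (c : Nat), c < n → a.length = n → a.getD c [] = [] →
      step a (c : Int) = a.set c (g c)) :
    ∀ (k m : Nat), m + k = n →
      (PySem.List.pyRange (m : Int) (n : Int) 1).foldl step
        ((List.range m).map g ++ List.replicate k ([] : List Int))
      = (List.range n).map g := by
  intro k
  induction k with
  | zero =>
    intro m hm
    have hmn : m = n := by omega
    subst hmn
    rw [PySem.List.pyRange_one_eq_nil le_rfl]
    simp
  | succ k ih =>
    intro m hm
    have hlt : (m : Int) < (n : Int) := by exact_mod_cast (by omega : m < n)
    rw [PySem.List.pyRange_one_cons hlt]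
    simp only [List.foldl_cons]
    have hlen : ((List.range m).map g ++ List.replicate (k+1) ([] : List Int)).length = n := by
      simp; omega
    have hgetD : ((List.range m).map g ++ List.replicate (k+1) ([] : List Int)).getD m [] = [] := by
      rw [List.getD_append_right _ _ _ _ (by simp)]
      simp
    rw [hstep _ m (by omega) hlen hgetD]
    have hset : ((List.range m).map g ++ List.replicate (k+1) ([] : List Int)).set m (g m)
        = (List.range (m+1)).map g ++ List.replicate k ([] : List Int) := by
      rw [List.set_append_right _ _ (by simp)]
      simp [List.range_succ, List.replicate_succ]
    rw [hset]
    have hcast : ((m : Int) + 1) = ((m + 1 : Nat) : Int) := by push_cast; ring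
    rw [hcast]
    exact ih (m + 1) (by omega)

lemma tabulate_fold (n : Nat) (step : List (List Int) → Int → List (List Int)) (g : Nat → List Int)
    (hstep : ∀ (a : List (List Int)) (c : Nat), c < n → a.length = n → a.getD c [] = [] →
      step a (c : Int) = a.set c (g c)) :
    (PySem.List.pyRange 0 (n : Int) 1).foldl step (List.replicate n ([] : List Int))
      = (List.range n).map g := by
  have h := tabulate_fold_aux n step g hstep n 0 (by omega)
  simpa using h

-- one conditional 'nbrs[c].append(v)' step, rewritten as a plain set of slot c
lemma cond_append (a : List (List Int)) (k : Nat) (hk : k < a.length) (P : Prop) [Decidable P]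
    (v : Int) (l : List Int) (hget : a.getD k [] = l) :
    (if P then PySem.List.pySetD a (k : Int) (PySem.List.pyGetD a (k : Int) [] ++ [v]) else a)
      = a.set k (l ++ if P then [v] else []) := by
  split_ifs with hP
  · rw [PySem.List.pySetD_natCast, PySem.List.pyGetD_natCast, hget]
  · rw [List.append_nil, ← hget, List.getD_eq_getElem _ _ hk, List.set_getElem_self]

lemma getD_set_self (a : List (List Int)) (k : Nat) (hk : k < a.length) (v : List Int) :
    (a.set k v).getD k [] = v := by
  rw [List.getD_eq_getElem _ _ (by simpa using hk)]
  simp [List.getElem_set_self]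

-- the all_to_all inner loop: repeated conditional appends to the fixed slot c
lemma inner_append (p : Int → Prop) [DecidablePred p] :
    ∀ (l : List Int) (a : List (List Int)) (k : Nat), k < a.length →
    l.foldl (fun a2 x => if p x then
        PySem.List.pySetD a2 (k : Int) (PySem.List.pyGetD a2 (k : Int) [] ++ [x]) else a2) a
      = a.set k (a.getD k [] ++ l.filter (fun x => decide (p x))) := by
  intro l
  induction l with
  | nil =>
    intro a k hk
    simp only [List.foldl_nil, List.filter_nil, List.append_nil]
    rw [List.getD_eq_getElem _ _ hk, List.set_getElem_self]
  | cons x l ih =>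
    intro a k hk
    simp only [List.foldl_cons, List.filter_cons]
    by_cases hp : p x
    · rw [if_pos hp, PySem.List.pySetD_natCast, PySem.List.pyGetD_natCast,
        ih (a.set k (a.getD k [] ++ [x])) k (by simpa using hk),
        getD_set_self a k hk, List.set_set]
      simp [hp]
    · rw [if_neg hp, ih a k hk]
      simp [hp]

-- per-topology slot contents of A's nbrs list
def gRing (nc : Int) (k : Nat) : List Int :=
  if 2 < nc then [PySem.Int.mod ((k:Int)+1) nc, PySem.Int.mod ((k:Int)-1) nc]
  else [PySem.Int.mod ((k:Int)+1) nc]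

def gLinear (nc : Int) (k : Nat) : List Int :=
  (if (k:Int)+1 < nc then [(k:Int)+1] else []) ++ (if (k:Int)-1 ≥ 0 then [(k:Int)-1] else [])

def gAll (nc : Int) (k : Nat) : List Int :=
  (PySem.List.pyRange 0 nc 1).filter (fun x => decide (x ≠ (k:Int)))

def gGrid (nc side : Int) (k : Nat) : List Int :=
  (if PySem.Int.mod (k:Int) side + 1 < side ∧ (k:Int)+1 < nc then [(k:Int)+1] else [])
    ++ (if PySem.Int.mod (k:Int) side > 0 ∧ (k:Int)-1 ≥ 0 then [(k:Int)-1] else [])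
    ++ (if (k:Int)+side < nc then [(k:Int)+side] else [])
    ++ (if (k:Int)-side ≥ 0 then [(k:Int)-side] else [])

-- len(sorted(set(l))) for a duplicate-free l is just len(l)
lemma lenSorted (l : List Int) (h : l.Nodup) :
    PySem.List.len (PySem.List.sorted (PySem.Set.ofList l) (fun x => x) false) = (l.length : Int) := by
  rw [PySem.List.len_eq, (PySem.List.sorted_perm _ _ _).length_eq,
    PySem.Set.ofList_eq_self_of_nodup l h]

lemma mod_ne_mod (nc x y : Int) (h2 : 2 < nc) (hxy : x - y = 2) :
    PySem.Int.mod x nc ≠ PySem.Int.mod y nc := by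
  intro h
  have hpos : (0:Int) < nc := by omega
  rw [PySem.Int.mod_eq_emod_of_pos hpos, PySem.Int.mod_eq_emod_of_pos hpos] at h
  have hdvd : nc ∣ (x - y) := Int.ModEq.dvd (Int.ModEq.symm h)
  rw [hxy] at hdvd
  have := Int.le_of_dvd (by omega) hdvd
  omega

lemma nodup_gRing (nc : Int) (k : Nat) : (gRing nc k).Nodup := by
  unfold gRing
  split_ifs with h
  · simp [mod_ne_mod nc ((k:Int)+1) ((k:Int)-1) h (by ring)]
  · simp

lemma length_gRing (nc : Int) (h2 : 2 ≤ nc) (k : Nat) :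
    ((gRing nc k).length : Int) = if nc = 2 then 1 else 2 := by
  by_cases h : 2 < nc
  · have h' : nc ≠ 2 := by omega
    simp [gRing, h, h']
  · have h' : nc = 2 := by omega
    simp [gRing, h, h']

lemma nodup_gLinear (nc : Int) (k : Nat) : (gLinear nc k).Nodup := by
  unfold gLinear
  split_ifs <;> simp <;> omega

lemma length_gLinear (nc : Int) (k : Nat) :
    ((gLinear nc k).length : Int) = (if (k:Int)+1 < nc then 1 else 0) + (if (k:Int) > 0 then 1 else 0) := by
  unfold gLinear
  have hiff : ((k:Int)-1 ≥ 0) ↔ ((k:Int) > 0) := by omega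
  split_ifs <;> simp_all

lemma nodup_gAll (nc : Int) (k : Nat) : (gAll nc k).Nodup :=
  (PySem.List.nodup_pyRange_one 0 nc).filter _

lemma gAll_eq (nc : Int) (k : Nat) (hk : (k:Int) < nc) (h0 : 0 ≤ (k:Int)) :
    gAll nc k = PySem.List.pyRange 0 (k:Int) 1 ++ PySem.List.pyRange ((k:Int)+1) nc 1 := by
  unfold gAll
  rw [PySem.List.pyRange_one_append 0 (k:Int) nc h0 (le_of_lt hk),
    PySem.List.pyRange_one_cons hk]
  rw [List.filter_append, List.filter_cons]
  simp only [decide_not, ne_eq, not_true_eq_false, decide_false]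
  rw [List.filter_eq_self.mpr, List.filter_eq_self.mpr]
  · simp
  · intro x hx
    have := PySem.List.mem_pyRange_one.mp hx
    simp; omega
  · intro x hx
    have := PySem.List.mem_pyRange_one.mp hx
    simp; omega

lemma length_gAll (nc : Int) (k : Nat) (hk : (k:Int) < nc) :
    ((gAll nc k).length : Int) = nc - 1 := by
  rw [gAll_eq nc k hk (by positivity)]
  rw [List.length_append, PySem.List.length_pyRange_one, PySem.List.length_pyRange_one]
  push_cast
  omega

lemma nodup_gGrid (nc side : Int) (_hs : 2 ≤ side) (k : Nat) : (gGrid nc side k).Nodup := by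
  unfold gGrid
  split_ifs <;> simp_all [List.Nodup] <;> omega

lemma col_pos_imp (side : Int) (k : Nat) (hs : 0 < side) (h : PySem.Int.mod (k:Int) side > 0) :
    (k:Int) - 1 ≥ 0 := by
  by_cases hk : (k:Int) = 0
  · rw [hk, PySem.Int.mod_eq_emod_of_pos hs] at h
    simp at h
  · have : 0 ≤ (k:Int) := by positivity
    omega

lemma length_gGrid (nc side : Int) (hs : 2 ≤ side) (k : Nat) :
    ((gGrid nc side k).length : Int) =
      (if PySem.Int.mod (k:Int) side + 1 < side ∧ (k:Int)+1 < nc then 1 else 0)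
        + (if PySem.Int.mod (k:Int) side > 0 then 1 else 0)
        + (if (k:Int)+side < nc then 1 else 0) + (if (k:Int)-side ≥ 0 then 1 else 0) := by
  unfold gGrid
  have hiff : (PySem.Int.mod (k:Int) side > 0 ∧ (k:Int)-1 ≥ 0) ↔ (PySem.Int.mod (k:Int) side > 0) := by
    constructor
    · exact fun h => h.1
    · exact fun h => ⟨h, col_pos_imp side k (by omega) h⟩
  rw [if_congr hiff rfl rfl]
  split_ifs <;> simp_all

lemma ceilSqrtInt_eq (nc : Int) : ceilSqrtInt nc =
    if Nat.sqrt nc.toNat * Nat.sqrt nc.toNat = nc.toNat then ((Nat.sqrt nc.toNat : Int))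
    else (Nat.sqrt nc.toNat : Int) + 1 := rfl

lemma side_ge_two (nc : Int) (h2 : 2 ≤ nc) : 2 ≤ ceilSqrtInt nc := by
  rw [ceilSqrtInt_eq]
  have hn : 2 ≤ nc.toNat := by omega
  have hr : 1 ≤ Nat.sqrt nc.toNat := by
    have := Nat.sqrt_pos.mpr (by omega : 0 < nc.toNat)
    omega
  split_ifs with h
  · have : 2 ≤ Nat.sqrt nc.toNat := by nlinarith [hr, h, hn]
    exact_mod_cast this
  · have : 2 ≤ Nat.sqrt nc.toNat + 1 := by omega
    exact_mod_cast this

def gTopo (nc : Int) (inter : String) (k : Nat) : List Int :=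
  if inter = "ring" then gRing nc k
  else if inter = "linear" then gLinear nc k
  else if inter = "all_to_all" then gAll nc k
  else if inter = "grid" then gGrid nc (ceilSqrtInt nc) k
  else gRing nc k

lemma nodup_gTopo (nc : Int) (h2 : 2 ≤ nc) (inter : String) (k : Nat) : (gTopo nc inter k).Nodup := by
  unfold gTopo
  split_ifs
  · exact nodup_gRing nc k
  · exact nodup_gLinear nc k
  · exact nodup_gAll nc k
  · exact nodup_gGrid nc (ceilSqrtInt nc) (side_ge_two nc h2) k
  · exact nodup_gRing nc k

lemma nbrs0_replicate (nc : Int) (h : 0 ≤ nc) :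
    ((PySem.List.pyRange 0 nc 1).map (fun _ => ([] : List Int))) = List.replicate nc.toNat [] := by
  rw [List.map_const']
  congr 1
  rw [PySem.List.length_pyRange_one]
  omega

lemma ring_fold (n : Nat) (_h2 : 2 ≤ (n : Int)) :
    (PySem.List.pyRange 0 (n : Int) 1).foldl (fun a c =>
      let a := PySem.List.pySetD a c (PySem.List.pyGetD a c [] ++ [PySem.Int.mod (c + 1) (n : Int)])
      if (n : Int) > 2 then
        PySem.List.pySetD a c (PySem.List.pyGetD a c [] ++ [PySem.Int.mod (c - 1) (n : Int)])
      else a)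
      (List.replicate n ([] : List Int))
    = (List.range n).map (gRing (n : Int)) := by
  apply tabulate_fold
  intro a c hc hlen h0
  have hca : c < a.length := hlen ▸ hc
  simp only [PySem.List.pySetD_natCast, PySem.List.pyGetD_natCast, h0, List.nil_append]
  rw [getD_set_self a c hca]
  unfold gRing
  by_cases h : (2 : Int) < (n : Int)
  · rw [if_pos h, if_pos h, List.set_set]
    simp
  · rw [if_neg h, if_neg h]

lemma linear_fold (n : Nat) :
    (PySem.List.pyRange 0 (n : Int) 1).foldl (fun a c =>
      let a := if c + 1 < (n : Int) then
          PySem.List.pySetD a c (PySem.List.pyGetD a c [] ++ [c + 1]) else a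
      if c - 1 ≥ 0 then
        PySem.List.pySetD a c (PySem.List.pyGetD a c [] ++ [c - 1]) else a)
      (List.replicate n ([] : List Int))
    = (List.range n).map (gLinear (n : Int)) := by
  apply tabulate_fold
  intro a c hc hlen h0
  have hca : c < a.length := hlen ▸ hc
  simp only []
  rw [cond_append a c hca ((c : Int) + 1 < (n : Int)) ((c : Int) + 1) [] h0]
  rw [cond_append _ c (by simpa using hca) ((c : Int) - 1 ≥ 0) ((c : Int) - 1)
    ([] ++ if (c : Int) + 1 < (n : Int) then [(c : Int) + 1] else []) (getD_set_self a c hca _)]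
  rw [List.set_set]
  unfold gLinear
  simp

lemma all_fold (n : Nat) :
    (PySem.List.pyRange 0 (n : Int) 1).foldl (fun a c =>
      (PySem.List.pyRange 0 (n : Int) 1).foldl (fun a2 c2 =>
        if c2 ≠ c then
          PySem.List.pySetD a2 c (PySem.List.pyGetD a2 c [] ++ [c2]) else a2) a)
      (List.replicate n ([] : List Int))
    = (List.range n).map (gAll (n : Int)) := by
  apply tabulate_fold
  intro a c hc hlen h0
  have hca : c < a.length := hlen ▸ hc
  rw [inner_append (fun x => x ≠ ((c : Nat) : Int)) (PySem.List.pyRange 0 (n : Int) 1) a c hca]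
  rw [h0]
  unfold gAll
  simp

lemma grid_fold (n : Nat) (side : Int) :
    (PySem.List.pyRange 0 (n : Int) 1).foldl (fun a c =>
      let _row := PySem.Int.floordiv c side
      let col := PySem.Int.mod c side
      let a := if col + 1 < side ∧ c + 1 < (n : Int) then
          PySem.List.pySetD a c (PySem.List.pyGetD a c [] ++ [c + 1]) else a
      let a := if col > 0 ∧ c - 1 ≥ 0 then
          PySem.List.pySetD a c (PySem.List.pyGetD a c [] ++ [c - 1]) else a
      let a := if c + side < (n : Int) then
          PySem.List.pySetD a c (PySem.List.pyGetD a c [] ++ [c + side]) else a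
      if c - side ≥ 0 then
        PySem.List.pySetD a c (PySem.List.pyGetD a c [] ++ [c - side]) else a)
      (List.replicate n ([] : List Int))
    = (List.range n).map (gGrid (n : Int) side) := by
  apply tabulate_fold
  intro a c hc hlen h0
  have hca : c < a.length := hlen ▸ hc
  simp only []
  rw [cond_append a c hca _ ((c : Int) + 1) [] h0]
  rw [cond_append _ c (by simpa using hca) _ ((c : Int) - 1) _ (getD_set_self a c hca _), List.set_set]
  rw [cond_append _ c (by simpa using hca) _ ((c : Int) + side) _ (getD_set_self a c hca _), List.set_set]
  rw [cond_append _ c (by simpa using hca) _ ((c : Int) - side) _ (getD_set_self a c hca _), List.set_set]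
  unfold gGrid
  simp

lemma icn_eq (n : Nat) (h2 : 2 ≤ (n : Int)) (t : String) (ht : ¬ t = "") :
    inter_core_neighbors (n : Int) t = (List.range n).map (fun k =>
      PySem.List.sorted (PySem.Set.ofList (gTopo (n : Int) (PySem.Str.lower t) k)) (fun x => x) false) := by
  unfold inter_core_neighbors
  rw [if_neg (by omega : ¬ (n : Int) < 2), if_neg ht]
  rw [nbrs0_replicate (n : Int) (by omega)]
  simp only [Int.toNat_natCast]
  unfold gTopo
  by_cases hr : PySem.Str.lower t = "ring"
  · rw [if_pos hr, ring_fold n h2, List.map_map]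
    simp [hr]
  rw [if_neg hr]
  by_cases hl : PySem.Str.lower t = "linear"
  · rw [if_pos hl, linear_fold n, List.map_map]
    simp [hl]
  rw [if_neg hl]
  by_cases ha : PySem.Str.lower t = "all_to_all"
  · rw [if_pos ha, all_fold n, List.map_map]
    simp [ha]
  rw [if_neg ha]
  by_cases hg : PySem.Str.lower t = "grid"
  · rw [if_pos hg, grid_fold n (ceilSqrtInt (n : Int)), List.map_map]
    simp [hg]
  · rw [if_neg hg, ring_fold n h2, List.map_map]
    simp [hr, hl, ha, hg]

lemma groups_getD (n : Nat) (h2 : 2 ≤ (n : Int)) (t : String) (ht : ¬ t = "") (k : Nat) (hk : k < n) :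
    PySem.List.pyGetD (num_comm_groups (n : Int) t) ((k : Nat) : Int) 0
      = ((gTopo (n : Int) (PySem.Str.lower t) k).length : Int) := by
  unfold num_comm_groups core_groups_for
  rw [icn_eq n h2 t ht, List.map_map, PySem.List.pyGetD_natCast]
  rw [List.getD_eq_getElem _ _ (by simpa using hk)]
  simp only [List.getElem_map, List.getElem_range, Function.comp_apply]
  exact lenSorted _ (nodup_gTopo (n : Int) h2 (PySem.Str.lower t) k)

-- ===== VERDICT (by name: the statement is the Claim_ definition above) =====
theorem clamp_k_for_topology_spec : Claim_equal_clamp_k_for_topology := by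
  intro nq0 nc0 t rk bp _
  unfold Spec_clamp_k_for_topology clamp_k_for_topology clamp_k_for_topology_alt
  simp only []
  set NQ := max 1 (if nq0 = 0 then 1 else nq0) with hNQ
  set NC := min (max 1 (if nc0 = 0 then 1 else nc0)) NQ with hNC
  by_cases hlt : NC < 2
  · rw [if_pos hlt, if_pos hlt]
  rw [if_neg hlt, if_neg hlt]
  have h2 : (2 : Int) ≤ NC := by omega
  obtain ⟨n, hn⟩ : ∃ n : Nat, NC = (n : Int) := ⟨NC.toNat, by omega⟩
  rw [hn] at h2 ⊢
  set T := (if t = "" then "ring" else t) with hT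
  have hT' : ¬ T = "" := by
    rw [hT]; split_ifs with h
    · decide
    · exact h
  set BB := max 1 (if bp = 0 then 1 else bp) with hBB
  have hBB1 : (1 : Int) ≤ BB := le_max_left _ _
  have hdeg : ∀ c : Int, 0 ≤ c → c < (n : Int) →
      PySem.List.pyGetD (num_comm_groups (n : Int) T) c 0 =
        (if PySem.Str.lower T = "all_to_all" then fun _ : Int => (n : Int) - 1
         else if PySem.Str.lower T = "linear" then
           fun c : Int => (if c + 1 < (n : Int) then 1 else 0) + (if c > 0 then 1 else 0)
         else if PySem.Str.lower T = "grid" then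
           fun c : Int =>
             (if PySem.Int.mod c (ceilSqrtInt (n : Int)) + 1 < ceilSqrtInt (n : Int) ∧ c + 1 < (n : Int) then 1 else 0)
               + (if PySem.Int.mod c (ceilSqrtInt (n : Int)) > 0 then 1 else 0)
               + (if c + ceilSqrtInt (n : Int) < (n : Int) then 1 else 0)
               + (if c - ceilSqrtInt (n : Int) ≥ 0 then 1 else 0)
         else fun _ : Int => if (n : Int) = 2 then 1 else 2) c := by
    intro c hc0 hcn
    obtain ⟨k, rfl⟩ : ∃ k : Nat, c = (k : Int) := ⟨c.toNat, by omega⟩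
    rw [groups_getD n h2 T hT' k (by exact_mod_cast hcn)]
    unfold gTopo
    by_cases hr : PySem.Str.lower T = "ring"
    · have h1 : PySem.Str.lower T ≠ "all_to_all" := by rw [hr]; decide
      have h3 : PySem.Str.lower T ≠ "linear" := by rw [hr]; decide
      have h4 : PySem.Str.lower T ≠ "grid" := by rw [hr]; decide
      rw [if_pos hr, if_neg h1, if_neg h3, if_neg h4]
      exact length_gRing (n : Int) h2 k
    rw [if_neg hr]
    by_cases hl : PySem.Str.lower T = "linear"
    · have h1 : PySem.Str.lower T ≠ "all_to_all" := by rw [hl]; decide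
      rw [if_pos hl, if_neg h1, if_pos hl]
      exact length_gLinear (n : Int) k
    rw [if_neg hl]
    by_cases ha : PySem.Str.lower T = "all_to_all"
    · rw [if_pos ha, if_pos ha]
      exact length_gAll (n : Int) k (by exact_mod_cast hcn)
    rw [if_neg ha, if_neg ha, if_neg hl]
    by_cases hg : PySem.Str.lower T = "grid"
    · rw [if_pos hg, if_pos hg]
      exact length_gGrid (n : Int) (ceilSqrtInt (n : Int)) (side_ge_two (n : Int) h2) k
    · rw [if_neg hg, if_neg hg]
      exact length_gRing (n : Int) h2 k
  have hfil : ∀ c ∈ PySem.List.pyRange 0 (n : Int) 1,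
      decide (PySem.List.pyGetD (num_comm_groups (n : Int) T) c 0 > 0) =
        decide ((if PySem.Str.lower T = "all_to_all" then fun _ : Int => (n : Int) - 1
         else if PySem.Str.lower T = "linear" then
           fun c : Int => (if c + 1 < (n : Int) then 1 else 0) + (if c > 0 then 1 else 0)
         else if PySem.Str.lower T = "grid" then
           fun c : Int =>
             (if PySem.Int.mod c (ceilSqrtInt (n : Int)) + 1 < ceilSqrtInt (n : Int) ∧ c + 1 < (n : Int) then 1 else 0)
               + (if PySem.Int.mod c (ceilSqrtInt (n : Int)) > 0 then 1 else 0)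
               + (if c + ceilSqrtInt (n : Int) < (n : Int) then 1 else 0)
               + (if c - ceilSqrtInt (n : Int) ≥ 0 then 1 else 0)
         else fun _ : Int => if (n : Int) = 2 then 1 else 2) c > 0) := by
    intro c hc
    have := PySem.List.mem_pyRange_one.mp hc
    rw [hdeg c this.1 this.2]
  rw [List.filter_congr hfil]
  apply congrArg (fun z => max 1 (min (if rk = 0 then 1 else rk) (max 1 z)))
  congr 1
  congr 1
  apply List.map_congr_left
  intro c hc
  have hmem := List.mem_filter.mp hc
  have hrange := PySem.List.mem_pyRange_one.mp hmem.1
  have hdegpos : (0:Int) < _ := of_decide_eq_true hmem.2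
  rw [hdeg c hrange.1 hrange.2]
  rw [PySem.List.pyGetD_map_pyRange_of_nonneg _ (n : Int) c 0 hrange.1 hrange.2]
  unfold _max_K_for_layout
  rw [if_neg (by omega)]
  have hBB0 : ¬ BB = 0 := by omega
  rw [if_neg hBB0]
  rw [max_eq_right hBB1]
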